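-- pv_equiv track=rewrite | github.com/parktaejun-dev/kobaco-addr | api/services/recommender.py | _get_priority_segments
-- ===== SOURCE A (Python) =====
-- def _get_priority_segments(expanded_keywords, all_segments):
--     if not expanded_keywords: return [], all_segments
--     priority = []
--     remaining = []
--     priority_names = set()
--     lower_keywords = [k.lower() for k in expanded_keywords if len(k) > 1]
--
--     for s in all_segments:
--         text = (str(s.get('name')) + str(s.get('description')) + str(s.get('recommended_advertisers'))).lower()
--         if any(k in text for k in lower_keywords):
--             if s['name'] not in priority_names:
--                 priority.append(s)
--                 priority_names.add(s['name'])
--         else: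
--             remaining.append(s)
--     return priority, remaining
-- ===== SOURCE B (Python) =====
-- def _get_priority_segments(expanded_keywords, all_segments):
--     if not expanded_keywords:
--         return [], all_segments
--     keys = [k.lower() for k in expanded_keywords if len(k) > 1]
--
--     def hits(s):
--         text = (str(s.get('name')) + str(s.get('description')) + str(s.get('recommended_advertisers'))).lower()
--         return any(k in text for k in keys)
--
--     remaining = [s for s in all_segments if not hits(s)]
--     by_name = {}
--     for s in all_segments:
--         if hits(s):
--             by_name.setdefault(s['name'], s)
--     return list(by_name.values()), remaining
-- ===== Notes on version B (the rewrite author's own statement) =====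
-- stated objective: alternative
-- what changed: A's single loop with three parallel accumulators (priority list, remaining list, seen-name set) is replaced by a filter comprehension for the remaining segments plus a name-keyed dict built with setdefault whose values(), in insertion order, are the priority list.
import Mathlib
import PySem

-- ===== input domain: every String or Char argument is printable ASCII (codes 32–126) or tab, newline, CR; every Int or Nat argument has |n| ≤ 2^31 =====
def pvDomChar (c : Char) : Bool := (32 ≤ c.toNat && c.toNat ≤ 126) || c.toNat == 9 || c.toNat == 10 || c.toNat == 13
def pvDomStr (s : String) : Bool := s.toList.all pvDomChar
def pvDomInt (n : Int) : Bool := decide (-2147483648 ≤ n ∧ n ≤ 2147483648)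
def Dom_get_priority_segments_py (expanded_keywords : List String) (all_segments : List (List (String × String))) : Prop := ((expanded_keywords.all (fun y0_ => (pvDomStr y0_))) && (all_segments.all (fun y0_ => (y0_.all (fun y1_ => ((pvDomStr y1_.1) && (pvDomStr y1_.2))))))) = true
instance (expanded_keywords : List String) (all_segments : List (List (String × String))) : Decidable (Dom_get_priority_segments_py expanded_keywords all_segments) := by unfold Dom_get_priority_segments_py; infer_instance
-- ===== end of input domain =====

-- B replaces A's one loop with three parallel accumulators by a filter for the
-- remaining segments plus a name-keyed dict (setdefault) whose values are the
-- priority list; same cost, different decomposition (objective: alternative).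


-- ===== PORT A =====
-- str(s.get(k)): a missing key gives Python None, str(None) = "None"
def pvStrGet (s : List (String × String)) (k : String) : String :=
  (PySem.Dict.get? (PySem.Dict.ofList s) k).getD "None"

-- (str(s.get('name')) + str(s.get('description')) + str(s.get('recommended_advertisers'))).lower()
-- ('+' on str is ported as "".join of the three pieces, which is the same concatenation)
def pvText (s : List (String × String)) : String :=
  PySem.Str.lower (PySem.Str.join "" [pvStrGet s "name", pvStrGet s "description", pvStrGet s "recommended_advertisers"])

-- [k.lower() for k in expanded_keywords if len(k) > 1]
def pvLowerKeys (expanded_keywords : List String) : List String :=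
  (expanded_keywords.filter (fun k => 1 < PySem.Str.len k)).map PySem.Str.lower

-- any(k in text for k in lower_keywords)
def pvMatch (lower_keywords : List String) (s : List (String × String)) : Bool :=
  lower_keywords.any (fun k => PySem.Str.isIn k (pvText s))

-- one iteration of A's for-loop; state = (priority, remaining, priority_names)
-- (where Python raises KeyError on s['name'] the port leaves the state unchanged; Pre_ excludes those inputs)
def pvStepA (lks : List String)
    (st : List (List (String × String)) × List (List (String × String)) × PySem.Set String)
    (s : List (String × String)) :
    List (List (String × String)) × List (List (String × String)) × PySem.Set String :=
  let (pri, rem, names) := st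
  if pvMatch lks s then
    match PySem.Dict.get? (PySem.Dict.ofList s) "name" with
    | some n => if PySem.Set.contains names n then (pri, rem, names)
                else (pri ++ [s], rem, PySem.Set.add names n)
    | none   => (pri, rem, names)
  else (pri, rem ++ [s], names)

def get_priority_segments_py (expanded_keywords : List String) (all_segments : List (List (String × String))) : (List (List (String × String))) × (List (List (String × String))) :=
  if expanded_keywords = [] then ([], all_segments) else
  let lks := pvLowerKeys expanded_keywords
  let st := all_segments.foldl (pvStepA lks) ([], [], PySem.Set.empty)
  (st.1, st.2.1)

-- ===== PORT B =====
-- by_name.setdefault(s['name'], s)  (KeyError on a missing 'name' excluded by Pre_; the port keys by "")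
def pvStepB (d : PySem.Dict String (List (String × String))) (s : List (String × String)) :
    PySem.Dict String (List (String × String)) :=
  PySem.Dict.setdefault d ((PySem.Dict.get? (PySem.Dict.ofList s) "name").getD "") s

def get_priority_segments_py_alt (expanded_keywords : List String) (all_segments : List (List (String × String))) : (List (List (String × String))) × (List (List (String × String))) :=
  if expanded_keywords = [] then ([], all_segments) else
  let lks := pvLowerKeys expanded_keywords
  let remaining := all_segments.filter (fun s => !(pvMatch lks s))
  let byName := (all_segments.filter (fun s => pvMatch lks s)).foldl pvStepB PySem.Dict.empty
  (PySem.Dict.values byName, remaining)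

-- ===== PRECONDITION & SPEC =====
-- Pre_ excludes exactly the inputs on which Python A raises KeyError:
-- a segment that matches some keyword but has no 'name' key (s['name'] is only evaluated on matching segments).
def Pre_get_priority_segments_py (expanded_keywords : List String) (all_segments : List (List (String × String))) : Prop :=
  ∀ s ∈ all_segments, expanded_keywords ≠ [] → pvMatch (pvLowerKeys expanded_keywords) s = true →
    (PySem.Dict.get? (PySem.Dict.ofList s) "name").isSome = true
instance (expanded_keywords : List String) (all_segments : List (List (String × String))) : Decidable (Pre_get_priority_segments_py expanded_keywords all_segments) := by unfold Pre_get_priority_segments_py; infer_instance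

def pvWitness_get_priority_segments_py : List String × (List (List (String × String))) :=
  (["Ad"], [[("name", "Ad Lovers"), ("description", "ads")], [("foo", "bar")]])

def Spec_get_priority_segments_py (expanded_keywords : List String) (all_segments : List (List (String × String))) (out : (List (List (String × String))) × (List (List (String × String)))) : Prop := out = get_priority_segments_py_alt expanded_keywords all_segments
instance (expanded_keywords : List String) (all_segments : List (List (String × String))) (out : (List (List (String × String))) × (List (List (String × String)))) : Decidable (Spec_get_priority_segments_py expanded_keywords all_segments out) := by unfold Spec_get_priority_segments_py; infer_instance

-- ===== CLAIM (what is proved, stated in full; the proofs are below) =====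
def Claim_equal_get_priority_segments_py : Prop := ∀ (expanded_keywords : List String) (all_segments : List (List (String × String))), Dom_get_priority_segments_py expanded_keywords all_segments → Pre_get_priority_segments_py expanded_keywords all_segments → Spec_get_priority_segments_py expanded_keywords all_segments (get_priority_segments_py expanded_keywords all_segments)

-- ===== LEMMAS AND PROOFS =====

-- B's dict loop only ever appends items (setdefault never reorders)
theorem pvStepB_fold_prefix (l : List (List (String × String)))
    (d : PySem.Dict String (List (String × String))) :
    ∃ t, (l.foldl pvStepB d).items = d.items ++ t := by
  induction l generalizing d with
  | nil => exact ⟨[], by simp⟩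
  | cons s l ih =>
    simp only [List.foldl_cons]
    rcases ih (pvStepB d s) with ⟨t, ht⟩
    by_cases hc : d.contains ((PySem.Dict.get? (PySem.Dict.ofList s) "name").getD "") = true
    · have hsd : pvStepB d s = d := by
        unfold pvStepB; exact PySem.Dict.setdefault_of_contains d s hc
      rw [hsd] at ht ⊢; exact ⟨t, ht⟩
    · have hc' : d.contains ((PySem.Dict.get? (PySem.Dict.ofList s) "name").getD "") = false := by
        simpa using hc
      have hsd : (pvStepB d s).items = d.items ++ [(((PySem.Dict.get? (PySem.Dict.ofList s) "name").getD ""), s)] := by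
        unfold pvStepB
        rw [PySem.Dict.setdefault_of_not_contains d s hc']
        exact PySem.Dict.items_insert_of_not_contains d s hc'
      refine ⟨((PySem.Dict.get? (PySem.Dict.ofList s) "name").getD "", s) :: t, ?_⟩
      rw [ht, hsd]
      simp

-- main loop correspondence: A's accumulators vs B's filters and dict
theorem pvLoop_corr (lks : List String) :
    ∀ (segs : List (List (String × String)))
      (pri rem : List (List (String × String)))
      (names : PySem.Set String) (d : PySem.Dict String (List (String × String))),
      (∀ n, n ∈ names ↔ d.contains n = true) →
      (∀ s ∈ segs, pvMatch lks s = true → (PySem.Dict.get? (PySem.Dict.ofList s) "name").isSome = true) →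
      (segs.foldl (pvStepA lks) (pri, rem, names)).1
        = pri ++ (((segs.filter (fun s => pvMatch lks s)).foldl pvStepB d).values).drop d.items.length
      ∧ (segs.foldl (pvStepA lks) (pri, rem, names)).2.1
        = rem ++ segs.filter (fun s => !(pvMatch lks s)) := by
  intro segs
  induction segs with
  | nil => intro pri rem names d _ _; simp [PySem.Dict.values]
  | cons s segs ih =>
    intro pri rem names d hinv hpre
    by_cases hmat : pvMatch lks s = true
    · obtain ⟨n, hn⟩ := Option.isSome_iff_exists.mp (hpre s (by simp) hmat)
      have hstep : pvStepA lks (pri, rem, names) s =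
          (if PySem.Set.contains names n = true then (pri, rem, names)
           else (pri ++ [s], rem, PySem.Set.add names n)) := by
        simp [pvStepA, hmat, hn]
      have hB : pvStepB d s = PySem.Dict.setdefault d n s := by
        simp [pvStepB, hn]
      by_cases hmem : n ∈ names
      · -- already seen: A skips, B's setdefault is the identity
        have hcont : PySem.Set.contains names n = true := (PySem.Set.contains_iff names n).mpr hmem
        have hd : d.contains n = true := (hinv n).mp hmem
        have hBd : pvStepB d s = d := by
          rw [hB]; exact PySem.Dict.setdefault_of_contains d s hd
        obtain ⟨h1, h2⟩ := ih pri rem names d hinv (fun s hs => hpre s (by simp [hs]))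
        constructor
        · rw [List.foldl_cons, hstep, if_pos hcont, List.filter_cons_of_pos hmat,
            List.foldl_cons, hBd, h1]
        · rw [List.foldl_cons, hstep, if_pos hcont, List.filter_cons_of_neg (by simp [hmat]), h2]
      · -- fresh name: A appends s, B inserts (n, s) at the end
        have hcont : PySem.Set.contains names n = false := by
          by_contra h
          exact hmem ((PySem.Set.contains_iff names n).mp (by simpa using h))
        have hd : d.contains n = false := by
          by_contra h
          exact hmem ((hinv n).mpr (by simpa using h))
        have hinv' : ∀ m, m ∈ PySem.Set.add names n ↔ (d.insert n s).contains m = true := by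
          intro m
          rw [PySem.Set.mem_add, PySem.Dict.contains_insert]
          constructor
          · rintro (h | rfl)
            · simp [(hinv m).mp h]
            · simp
          · intro h
            rcases Bool.or_eq_true_iff.mp h with h | h
            · exact Or.inr (by simpa using h)
            · exact Or.inl ((hinv m).mpr h)
        obtain ⟨h1, h2⟩ := ih (pri ++ [s]) rem (PySem.Set.add names n) (d.insert n s) hinv'
          (fun s hs => hpre s (by simp [hs]))
        have hBd : pvStepB d s = d.insert n s := by
          rw [hB]; exact PySem.Dict.setdefault_of_not_contains d s hd
        have hitems : (d.insert n s).items = d.items ++ [(n, s)] :=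
          PySem.Dict.items_insert_of_not_contains d s hd
        obtain ⟨t, ht⟩ := pvStepB_fold_prefix (segs.filter (fun s => pvMatch lks s)) (d.insert n s)
        have hvals : ((segs.filter (fun s => pvMatch lks s)).foldl pvStepB (d.insert n s)).values
            = d.values ++ s :: t.map Prod.snd := by
          simp [PySem.Dict.values, ht, hitems]
        have hlen : d.values.length = d.items.length := by simp [PySem.Dict.values]
        have hne : ¬ PySem.Set.contains names n = true := by rw [hcont]; simp
        have e1 : (d.values ++ s :: t.map Prod.snd).drop d.items.length = s :: t.map Prod.snd := by
          rw [← hlen, List.drop_left]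
        have e2 : (d.values ++ s :: t.map Prod.snd).drop (d.insert n s).items.length
            = t.map Prod.snd := by
          have hsplit : d.values ++ s :: t.map Prod.snd = (d.values ++ [s]) ++ t.map Prod.snd := by
            simp
          have hlen' : (d.insert n s).items.length = (d.values ++ [s]).length := by
            simp [hitems, hlen]
          rw [hsplit, hlen', List.drop_left]
        constructor
        · rw [List.foldl_cons, hstep, if_neg hne, List.filter_cons_of_pos hmat,
            List.foldl_cons, hBd, h1, hvals, e1, e2]
          simp
        · rw [List.foldl_cons, hstep, if_neg hne,
            List.filter_cons_of_neg (by simp [hmat]), h2]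
    · -- no keyword matches: A appends to remaining, B's filters keep s in remaining only
      have hstep : pvStepA lks (pri, rem, names) s = (pri, rem ++ [s], names) := by
        simp [pvStepA, hmat]
      obtain ⟨h1, h2⟩ := ih pri (rem ++ [s]) names d hinv (fun s hs => hpre s (by simp [hs]))
      constructor
      · rw [List.foldl_cons, hstep, h1, List.filter_cons_of_neg (by simp [hmat])]
      · rw [List.foldl_cons, hstep, h2, List.filter_cons_of_pos (by simp [hmat])]
        simp

-- ===== VERDICT (by name: the statement is the Claim_ definition above) =====
theorem get_priority_segments_py_spec : Claim_equal_get_priority_segments_py := by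
  intro ks segs _ hpre
  unfold Spec_get_priority_segments_py get_priority_segments_py get_priority_segments_py_alt
  by_cases hks : ks = []
  · simp [hks]
  · simp only [if_neg hks]
    have hpre' : ∀ s ∈ segs, pvMatch (pvLowerKeys ks) s = true →
        (PySem.Dict.get? (PySem.Dict.ofList s) "name").isSome = true :=
      fun s hs hm => hpre s hs hks hm
    have hinv : ∀ n, n ∈ (PySem.Set.empty : PySem.Set String) ↔
        (PySem.Dict.empty : PySem.Dict String (List (String × String))).contains n = true := by
      intro n; simp [PySem.Set.empty, PySem.Dict.contains_empty]
    have h := pvLoop_corr (pvLowerKeys ks) segs [] [] PySem.Set.empty PySem.Dict.empty hinv hpre'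
    rcases h with ⟨h1, h2⟩
    refine Prod.ext ?_ ?_
    · simpa [PySem.Dict.empty] using h1
    · simpa using h2
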